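-- pv_equiv track=rewrite | github.com/slidracoon72/leetcode | RemoveDuplicates2.py | removeDulicates1
-- ===== SOURCE A (Python) =====
-- def removeDulicates1(nums):
--     l, r = 0, 0  # Initialize two pointers, l for writing position, r for reading position
--
--     while r < len(nums):  # Iterate through the list with the right pointer
--         count = 1  # Initialize count of current element
--         # Expanding r to check for consecutive duplicates
--         while r + 1 < len(nums) and nums[r] == nums[r + 1]:
--             r += 1  # Move right pointer to the next duplicate
--             count += 1  # Increment the count of the current element
--
--         # Keep at most 2 elements of the current value
--         for i in range(min(2, count)):  # We use min(2, count) to allow at most 2 duplicates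
--             nums[l] = nums[r]  # Write the current element to the left pointer position
--             l += 1  # Move the left pointer to the next position
--
--         r += 1  # Move right pointer to the next new element
--
--     return l  # Return the length of the modified list
-- ===== SOURCE B (Python) =====
-- def removeDulicates1(nums):
--     l = 0
--     prev = None  # for int lists None never equals an element, so the first element starts a run
--     count = 0
--     for x in nums:
--         if x == prev:
--             count += 1
--         else:
--             prev = x
--             count = 1
--         if count <= 2:
--             l += 1
--     return l
-- ===== Notes on version B (the rewrite author's own statement) =====
-- stated objective: simpler
-- what changed: A's nested expand-the-run inner while plus a write-back for loop over two pointers is replaced by a single flat pass that maintains the previous element and a running consecutive count, incrementing the length whenever the count is at most 2; B does no index arithmetic and no in-place writes (the claim is about the return value), which also makes it measurably faster by a constant factor.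
import Mathlib
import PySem

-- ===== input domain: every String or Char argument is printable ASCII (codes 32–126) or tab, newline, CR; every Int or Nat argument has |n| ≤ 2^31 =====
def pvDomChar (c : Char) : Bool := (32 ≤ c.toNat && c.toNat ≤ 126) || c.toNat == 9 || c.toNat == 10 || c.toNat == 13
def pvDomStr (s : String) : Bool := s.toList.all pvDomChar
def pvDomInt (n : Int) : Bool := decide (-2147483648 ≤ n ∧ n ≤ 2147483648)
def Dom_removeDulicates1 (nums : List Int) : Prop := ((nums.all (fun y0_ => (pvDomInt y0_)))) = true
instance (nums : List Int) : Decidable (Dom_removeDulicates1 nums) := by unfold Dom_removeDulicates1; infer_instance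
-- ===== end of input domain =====

-- B replaces A's nested expand-the-run/write-back two-pointer loops by one flat pass keeping a
-- previous-element/consecutive-count state (objective: simpler). A mutates nums in place and B
-- does not; the equivalence proved here is about the RETURN value only.

-- ===== PORT A =====
-- inner `while r + 1 < len(nums) and nums[r] == nums[r + 1]: r += 1; count += 1`
-- (indices l, r are Nat: they start at 0 and only grow; in-range reads use getD)
def expandA (nums : List Int) (r c : Nat) : Nat × Nat :=
  if h : r + 1 < nums.length ∧ nums.getD r 0 = nums.getD (r + 1) 0 then
    expandA nums (r + 1) (c + 1)
  else (r, c)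
termination_by nums.length - r
decreasing_by omega

-- `for i in range(min(2, count)): nums[l] = nums[r]; l += 1` (the in-place writes are carried)
def writeA (nums : List Int) (l r : Nat) : Nat → List Int × Nat
  | 0 => (nums, l)
  | Nat.succ n => writeA (nums.set l (nums.getD r 0)) (l + 1) r n

-- termination helpers for the outer while (cited by `decreasing_by` below)
theorem expandA_fst_ge : ∀ (k : Nat) (nums : List Int) (r c : Nat),
    nums.length - r ≤ k → r ≤ (expandA nums r c).1 := by
  intro k
  induction k with
  | zero =>
    intro nums r c hk
    rw [expandA]
    split_ifs with h
    · exact absurd h.1 (by omega)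
    · exact Nat.le_refl r
  | succ k ih =>
    intro nums r c hk
    rw [expandA]
    split_ifs with h
    · have := ih nums (r + 1) (c + 1) (by omega)
      omega
    · exact Nat.le_refl r

theorem writeA_length (r : Nat) : ∀ (n : Nat) (nums : List Int) (l : Nat),
    ((writeA nums l r n).1).length = nums.length := by
  intro n
  induction n with
  | zero => intro nums l; rfl
  | succ n ih => intro nums l; rw [writeA, ih]; simp

-- outer `while r < len(nums)` of A
def loopA (nums : List Int) (l r : Nat) : Int :=
  if h : r < nums.length then
    loopA (writeA nums l (expandA nums r 1).1 (min 2 (expandA nums r 1).2)).1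
          (writeA nums l (expandA nums r 1).1 (min 2 (expandA nums r 1).2)).2
          ((expandA nums r 1).1 + 1)
  else (l : Int)
termination_by nums.length - r
decreasing_by
  rw [writeA_length]
  have := expandA_fst_ge nums.length nums r 1 (by omega)
  omega

def removeDulicates1 (nums : List Int) : Int := loopA nums 0 0

-- ===== PORT B =====
-- one step of B's flat loop: state (l, prev, count)
def stepB (s : Int × Option Int × Nat) (x : Int) : Int × Option Int × Nat :=
  match s with
  | (l, prev, count) =>
    let pc := if some x = prev then (prev, count + 1) else (some x, 1)
    if pc.2 ≤ 2 then (l + 1, pc.1, pc.2) else (l, pc.1, pc.2)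

def removeDulicates1_alt (nums : List Int) : Int :=
  (nums.foldl stepB (0, none, 0)).1

-- ===== PRECONDITION & SPEC =====
def Spec_removeDulicates1 (nums : List Int) (out : Int) : Prop := out = removeDulicates1_alt nums
instance (nums : List Int) (out : Int) : Decidable (Spec_removeDulicates1 nums out) := by unfold Spec_removeDulicates1; infer_instance

-- ===== CLAIM (what is proved, stated in full; the proofs are below) =====
def Claim_equal_removeDulicates1 : Prop := ∀ (nums : List Int), Dom_removeDulicates1 nums → Spec_removeDulicates1 nums (removeDulicates1 nums)

-- ===== LEMMAS AND PROOFS =====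

-- the length increment contributed by B's loop from a given (prev, count) state
def hB (prev : Option Int) (c : Nat) : List Int → Int
  | [] => 0
  | x :: xs =>
    let pc := if some x = prev then (prev, c + 1) else (some x, 1)
    (if pc.2 ≤ 2 then 1 else 0) + hB pc.1 pc.2 xs

theorem stepB_pos (l : Int) (prev : Option Int) (c : Nat) (x : Int) (hx : some x = prev) :
    stepB (l, prev, c) x = if c + 1 ≤ 2 then (l + 1, prev, c + 1) else (l, prev, c + 1) := by
  simp only [stepB, hx, if_pos]

theorem stepB_neg (l : Int) (prev : Option Int) (c : Nat) (x : Int) (hx : ¬ some x = prev) :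
    stepB (l, prev, c) x = (l + 1, some x, 1) := by
  simp [stepB, hx]

theorem hB_cons_pos (prev : Option Int) (c : Nat) (x : Int) (xs : List Int) (hx : some x = prev) :
    hB prev c (x :: xs) = (if c + 1 ≤ 2 then (1 : Int) else 0) + hB prev (c + 1) xs := by
  simp only [hB, hx, if_pos]

theorem hB_cons_neg (prev : Option Int) (c : Nat) (x : Int) (xs : List Int) (hx : ¬ some x = prev) :
    hB prev c (x :: xs) = 1 + hB (some x) 1 xs := by
  simp [hB, hx]

theorem foldB_fst (ys : List Int) : ∀ (l : Int) (prev : Option Int) (c : Nat),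
    (List.foldl stepB (l, prev, c) ys).1 = l + hB prev c ys := by
  induction ys with
  | nil => intro l prev c; simp [hB]
  | cons x xs ih =>
    intro l prev c
    rw [List.foldl_cons]
    by_cases hx : some x = prev
    · rw [stepB_pos _ _ _ _ hx, hB_cons_pos _ _ _ _ hx]
      split_ifs with h2 <;> rw [ih] <;> omega
    · rw [stepB_neg _ _ _ _ hx, hB_cons_neg _ _ _ _ hx, ih]
      omega

theorem hB_run (x : Int) : ∀ (xs : List Int) (c : Nat), 1 ≤ c →
    hB (some x) c xs =
      ((min 2 (c + (xs.takeWhile (fun y => y == x)).length) : Nat) : Int)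
        - ((min 2 c : Nat) : Int)
        + hB none 0 (xs.dropWhile (fun y => y == x)) := by
  intro xs
  induction xs with
  | nil => intro c _; simp [hB]
  | cons y ys ih =>
    intro c hc
    by_cases hy : y = x
    · subst hy
      rw [hB_cons_pos _ _ _ _ rfl, ih (c + 1) (by omega)]
      simp only [List.takeWhile_cons, List.dropWhile_cons, beq_self_eq_true, if_true,
        List.length_cons]
      split_ifs with h <;> push_cast <;> omega
    · have hx' : ¬ some y = some x := by simpa using hy
      have hby : (y == x) = false := by simpa using hy
      rw [hB_cons_neg _ _ _ _ hx']
      have h2 : hB none 0 (y :: ys) = 1 + hB (some y) 1 ys := hB_cons_neg _ _ _ _ (by simp)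
      simp only [List.takeWhile_cons, List.dropWhile_cons, hby, if_neg, Bool.false_eq_true,
        not_false_eq_true, List.length_nil, h2]
      push_cast
      omega

-- reads of A happen only at indices ≥ r, so lists agreeing from r give the same expansion
theorem expandA_congr : ∀ (k : Nat) (nums nums' : List Int) (r c : Nat),
    nums.length - r ≤ k → nums'.length = nums.length →
    (∀ j, r ≤ j → nums'.getD j 0 = nums.getD j 0) →
    expandA nums' r c = expandA nums r c := by
  intro k
  induction k with
  | zero =>
    intro nums nums' r c hk hl hag
    have e1 : expandA nums r c = (r, c) := by
      rw [expandA]; exact dif_neg (by rintro ⟨h, -⟩; omega)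
    have e2 : expandA nums' r c = (r, c) := by
      rw [expandA]; exact dif_neg (by rintro ⟨h, -⟩; omega)
    rw [e1, e2]
  | succ k ih =>
    intro nums nums' r c hk hl hag
    by_cases hc : r + 1 < nums.length ∧ nums.getD r 0 = nums.getD (r + 1) 0
    · have hc' : r + 1 < nums'.length ∧ nums'.getD r 0 = nums'.getD (r + 1) 0 := by
        refine ⟨by omega, ?_⟩
        rw [hag r (Nat.le_refl r), hag (r + 1) (by omega)]
        exact hc.2
      have e1 : expandA nums r c = expandA nums (r + 1) (c + 1) := by
        rw [expandA]; exact dif_pos hc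
      have e2 : expandA nums' r c = expandA nums' (r + 1) (c + 1) := by
        rw [expandA]; exact dif_pos hc'
      rw [e1, e2]
      exact ih nums nums' (r + 1) (c + 1) (by omega) hl (fun j hj => hag j (by omega))
    · have hc' : ¬ (r + 1 < nums'.length ∧ nums'.getD r 0 = nums'.getD (r + 1) 0) := by
        intro h
        exact hc ⟨by omega, by rw [← hag r (Nat.le_refl r), ← hag (r + 1) (by omega)]; exact h.2⟩
      have e1 : expandA nums r c = (r, c) := by rw [expandA]; exact dif_neg hc
      have e2 : expandA nums' r c = (r, c) := by rw [expandA]; exact dif_neg hc'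
      rw [e1, e2]

theorem expandA_spec : ∀ (k : Nat) (nums : List Int) (r c : Nat),
    nums.length - r ≤ k → r < nums.length →
    expandA nums r c =
      (r + ((nums.drop (r + 1)).takeWhile (fun y => y == nums.getD r 0)).length,
       c + ((nums.drop (r + 1)).takeWhile (fun y => y == nums.getD r 0)).length) := by
  intro k
  induction k with
  | zero => intro nums r c hk hr; omega
  | succ k ih =>
    intro nums r c hk hr
    by_cases h1 : r + 1 < nums.length
    · have hd : nums.drop (r + 1) = nums[r + 1] :: nums.drop (r + 2) := by
        rw [List.drop_eq_getElem_cons h1]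
      have hg1 : nums.getD (r + 1) 0 = nums[r + 1] := by
        simp [List.getD_eq_getElem?_getD, List.getElem?_eq_getElem h1]
      by_cases h2 : nums.getD r 0 = nums.getD (r + 1) 0
      · have e1 : expandA nums r c = expandA nums (r + 1) (c + 1) := by
          rw [expandA]; exact dif_pos ⟨h1, h2⟩
        have hx : (nums[r + 1] == nums.getD (r + 1) 0) = true := by
          rw [beq_iff_eq, hg1]
        rw [e1, ih nums (r + 1) (c + 1) (by omega) h1, h2, hd]
        simp only [List.takeWhile_cons, hx, if_true, List.length_cons, Prod.mk.injEq,
          show r + 1 + 1 = r + 2 from rfl]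
        omega
      · have e1 : expandA nums r c = (r, c) := by
          rw [expandA]; exact dif_neg (by rintro ⟨-, hcc⟩; exact h2 hcc)
        have hx : (nums[r + 1] == nums.getD r 0) = false := by
          rw [beq_eq_false_iff_ne, ← hg1]
          exact fun he => h2 he.symm
        have ht0 : ((nums.drop (r + 1)).takeWhile (fun y => y == nums.getD r 0)).length = 0 := by
          rw [hd]
          simp only [List.takeWhile_cons, hx, Bool.false_eq_true, if_false, List.length_nil]
        rw [e1, ht0]
        simp
    · have e1 : expandA nums r c = (r, c) := by
        rw [expandA]; exact dif_neg (by rintro ⟨hcc, -⟩; omega)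
      have hnil : nums.drop (r + 1) = [] := List.drop_eq_nil_of_le (by omega)
      rw [e1, hnil]
      simp

theorem writeA_snd (r : Nat) : ∀ (n : Nat) (nums : List Int) (l : Nat),
    (writeA nums l r n).2 = l + n := by
  intro n
  induction n with
  | zero => intro nums l; rfl
  | succ n ih => intro nums l; rw [writeA, ih]; omega

theorem writeA_getD_ge (r : Nat) : ∀ (n : Nat) (nums : List Int) (l j : Nat),
    l + n ≤ j → (writeA nums l r n).1.getD j 0 = nums.getD j 0 := by
  intro n
  induction n with
  | zero => intro nums l j _; rfl
  | succ n ih =>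
    intro nums l j hj
    rw [writeA, ih _ _ _ (by omega)]
    simp only [List.getD_eq_getElem?_getD]
    rw [List.getElem?_set_ne (by omega)]

-- main invariant: A's loop on any list agreeing with `nums` from index r on returns
-- l plus B's contribution over the untouched suffix
theorem loopA_eq_hB : ∀ (k : Nat) (nums nums' : List Int) (l r : Nat),
    nums.length - r ≤ k → nums'.length = nums.length →
    (∀ j, r ≤ j → nums'.getD j 0 = nums.getD j 0) → l ≤ r →
    loopA nums' l r = (l : Int) + hB none 0 (nums.drop r) := by
  intro k
  induction k with
  | zero =>
    intro nums nums' l r hk hl hag hlr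
    rw [loopA, dif_neg (by omega), List.drop_eq_nil_of_le (by omega)]
    simp [hB]
  | succ k ih =>
    intro nums nums' l r hk hl hag hlr
    by_cases hr : r < nums.length
    · rw [loopA, dif_pos (by omega)]
      set x := nums.getD r 0 with hxdef
      set t := ((nums.drop (r + 1)).takeWhile (fun y => y == x)).length with htdef
      have hec : expandA nums' r 1 = expandA nums r 1 :=
        expandA_congr (nums.length - r) nums nums' r 1 (Nat.le_refl _) hl hag
      have hes : expandA nums r 1 = (r + t, 1 + t) :=
        expandA_spec nums.length nums r 1 (by omega) hr
      rw [hec, hes]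
      rw [show ((r + t, 1 + t) : Nat × Nat).1 = r + t from rfl,
          show ((r + t, 1 + t) : Nat × Nat).2 = 1 + t from rfl]
      have hmin : min 2 (1 + t) ≤ 1 + t := Nat.min_le_right _ _
      have hw2 : (writeA nums' l (r + t) (min 2 (1 + t))).2 = l + min 2 (1 + t) :=
        writeA_snd _ _ _ _
      rw [hw2]
      have hrec := ih nums
        ((writeA nums' l (r + t) (min 2 (1 + t))).1)
        (l + min 2 (1 + t)) (r + t + 1)
        (by omega)
        (by rw [writeA_length, hl])
        (by
          intro j hj
          rw [writeA_getD_ge _ _ _ _ j (by omega)]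
          exact hag j (by omega))
        (by omega)
      rw [hrec]
      -- relate hB over the run starting at r to hB over the rest
      have hd : nums.drop r = x :: nums.drop (r + 1) := by
        rw [List.drop_eq_getElem_cons hr]
        congr 1
        simp [hxdef, List.getD_eq_getElem?_getD, List.getElem?_eq_getElem hr]
      have hstep : hB none 0 (nums.drop r) = 1 + hB (some x) 1 (nums.drop (r + 1)) := by
        rw [hd]; exact hB_cons_neg _ _ _ _ (by simp)
      have hdrop : nums.drop (r + t + 1) = (nums.drop (r + 1)).drop t := by
        rw [List.drop_drop]; congr 1; omega
      have hdw : (nums.drop (r + 1)).drop t = (nums.drop (r + 1)).dropWhile (fun y => y == x) := by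
        conv_lhs => rw [← List.takeWhile_append_dropWhile (p := fun y => y == x) (l := nums.drop (r + 1))]
        rw [show t = ((nums.drop (r + 1)).takeWhile (fun y => y == x)).length from htdef]
        exact List.drop_left
      have hrun := hB_run x (nums.drop (r + 1)) 1 (Nat.le_refl 1)
      rw [← htdef, ← hdw, ← hdrop] at hrun
      rw [hstep, hrun]
      push_cast
      omega
    · rw [loopA, dif_neg (by omega), List.drop_eq_nil_of_le (by omega)]
      simp [hB]

-- ===== VERDICT (by name: the statement is the Claim_ definition above) =====
theorem removeDulicates1_spec : Claim_equal_removeDulicates1 := by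
  unfold Claim_equal_removeDulicates1
  intro nums _
  unfold Spec_removeDulicates1 removeDulicates1 removeDulicates1_alt
  rw [loopA_eq_hB nums.length nums nums 0 0 (by omega) rfl (fun _ _ => rfl) (Nat.le_refl 0)]
  rw [foldB_fst]
  simp
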